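-- pv_equiv track=rewrite | github.com/sanclee09/causalLatentPolytree | validation.py | is_polytree
-- ===== SOURCE A (Python) =====
-- from typing import List, Tuple, Set
-- from collections import deque
--
-- def has_cycles(edges: List[Tuple[str, str]]) -> bool:
--     """
--     Check if graph has cycles using DFS.
--
--     Args:
--         edges: List of directed edges
--
--     Returns:
--         True if graph contains a cycle, False otherwise
--     """
--     # Build adjacency list
--     graph = {}
--     nodes = set()
--
--     for parent, child in edges:
--         nodes.add(parent)
--         nodes.add(child)
--         graph.setdefault(parent, []).append(child)
--
--     visited = set()
--     rec_stack = set()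
--
--     def dfs_has_cycle(node):
--         visited.add(node)
--         rec_stack.add(node)
--
--         for neighbor in graph.get(node, []):
--             if neighbor not in visited:
--                 if dfs_has_cycle(neighbor):
--                     return True
--             elif neighbor in rec_stack:
--                 return True
--
--         rec_stack.remove(node)
--         return False
--
--     for node in nodes:
--         if node not in visited:
--             if dfs_has_cycle(node):
--                 return True
--
--     return False
--
-- def is_polytree(edges: List[Tuple[str, str]]) -> bool:
--     """
--     Check if graph is a polytree (DAG that is a tree when undirected).
--
--     Args:
--         edges: List of directed edges
--
--     Returns:
--         True if graph is a valid polytree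
--     """
--     # Must be acyclic
--     if has_cycles(edges):
--         return False
--
--     # Check connectivity and tree property on undirected version
--     nodes = set()
--     undirected_graph = {}
--
--     for parent, child in edges:
--         nodes.add(parent)
--         nodes.add(child)
--         undirected_graph.setdefault(parent, []).append(child)
--         undirected_graph.setdefault(child, []).append(parent)
--
--     if not nodes:
--         return True
--
--     # BFS to check connectivity
--     start = next(iter(nodes))
--     visited = {start}
--     queue = deque([start])
--
--     while queue:
--         node = queue.popleft()
--         for neighbor in undirected_graph.get(node, []):
--             if neighbor not in visited:
--                 visited.add(neighbor)
--                 queue.append(neighbor)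
--
--     # Must be connected and have n-1 edges for n nodes (tree property)
--     return len(visited) == len(nodes) and len(edges) == len(nodes) - 1
-- ===== SOURCE B (Python) =====
-- def is_polytree(edges):
--     """Union-find (quick-find) pass: each edge must join two distinct
--     components, and at the end all nodes must share one component."""
--     comp = {}
--     for a, b in edges:
--         ra = comp.setdefault(a, a)
--         rb = comp.setdefault(b, b)
--         if ra == rb:
--             return False
--         comp = {k: (ra if v == rb else v) for k, v in comp.items()}
--     return len(set(comp.values())) <= 1
-- ===== Notes on version B (the rewrite author's own statement) =====
-- stated objective: simpler
-- what changed: Replaces A's three separate passes (recursive DFS directed-cycle check, BFS connectivity check, n-1 edge count) with a single union-find (quick-find) sweep over the edges: an edge whose endpoints are already in one component means False, and at the end all nodes must share one component.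
import Mathlib
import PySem

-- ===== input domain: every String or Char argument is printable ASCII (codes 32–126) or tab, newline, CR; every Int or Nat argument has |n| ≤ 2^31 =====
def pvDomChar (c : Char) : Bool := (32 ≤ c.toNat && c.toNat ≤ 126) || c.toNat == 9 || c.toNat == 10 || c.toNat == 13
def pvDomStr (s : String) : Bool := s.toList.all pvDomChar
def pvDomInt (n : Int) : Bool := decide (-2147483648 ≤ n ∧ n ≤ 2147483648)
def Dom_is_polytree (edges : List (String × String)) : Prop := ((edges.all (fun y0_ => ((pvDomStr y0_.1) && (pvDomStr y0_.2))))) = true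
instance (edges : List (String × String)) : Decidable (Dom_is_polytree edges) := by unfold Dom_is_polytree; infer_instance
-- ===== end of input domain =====

-- B replaces A's three passes (DFS cycle check, BFS connectivity, edge count) with a single
-- union-find (quick-find) sweep over the edges; objective: simpler (not faster).

-- ===== PORT A =====
-- has_cycles: build (graph, nodes) in one pass over edges (literal port of A's loop)
def pvBuildDG (edges : List (String × String)) :
    PySem.Dict String (List String) × PySem.Set String :=
  edges.foldl
    (fun st e =>
      (st.1.modify e.1 [] (fun l => l ++ [e.2]),
       PySem.Set.add (PySem.Set.add st.2 e.1) e.2))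
    (PySem.Dict.empty, PySem.Set.empty)

-- dfs_has_cycle, with fuel for the recursion depth (ample: depth is bounded by the
-- number of nodes, since dfs is only entered on unvisited nodes and marks them first)
mutual
def pvDfs (g : PySem.Dict String (List String)) :
    Nat → String → PySem.Set String → PySem.Set String →
    PySem.Set String × PySem.Set String × Bool
  | 0, _, vis, rst => (vis, rst, false)
  | fuel+1, node, vis, rst =>
      pvDfsL g fuel (g.getD node []) node
        (PySem.Set.add vis node) (PySem.Set.add rst node)
  termination_by fuel _ _ _ => (fuel, 0)

def pvDfsL (g : PySem.Dict String (List String)) :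
    Nat → List String → String → PySem.Set String → PySem.Set String →
    PySem.Set String × PySem.Set String × Bool
  | _, [], node, vis, rst => (vis, PySem.Set.discard rst node, false)
  | fuel, nb :: rest, node, vis, rst =>
      if PySem.Set.contains vis nb then
        if PySem.Set.contains rst nb then (vis, rst, true)
        else pvDfsL g fuel rest node vis rst
      else
        match pvDfs g fuel nb vis rst with
        | (vis', rst', true) => (vis', rst', true)
        | (vis', rst', false) => pvDfsL g fuel rest node vis' rst'
  termination_by fuel ns _ _ _ => (fuel, ns.length + 1)
end

-- 'for node in nodes: if node not in visited: if dfs_has_cycle(node): return True'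
def pvCycleScan (g : PySem.Dict String (List String)) (fuel : Nat) :
    List String → PySem.Set String → PySem.Set String → Bool
  | [], _, _ => false
  | n :: rest, vis, rst =>
      if PySem.Set.contains vis n then pvCycleScan g fuel rest vis rst
      else
        match pvDfs g fuel n vis rst with
        | (_, _, true) => true
        | (vis', rst', false) => pvCycleScan g fuel rest vis' rst'

def pvHasCycles (edges : List (String × String)) : Bool :=
  let st := pvBuildDG edges
  pvCycleScan st.1 (st.2.length + 1) st.2 PySem.Set.empty PySem.Set.empty

-- is_polytree: build (nodes, undirected_graph) in one pass (literal port of A's loop)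
def pvBuildUG (edges : List (String × String)) :
    PySem.Set String × PySem.Dict String (List String) :=
  edges.foldl
    (fun st e =>
      (PySem.Set.add (PySem.Set.add st.1 e.1) e.2,
       (st.2.modify e.1 [] (fun l => l ++ [e.2])).modify e.2 [] (fun l => l ++ [e.1])))
    (PySem.Set.empty, PySem.Dict.empty)

-- inner 'for neighbor in undirected_graph.get(node, [])' of the BFS loop
def pvBfsNbrs : List String → PySem.Set String → List String →
    PySem.Set String × List String
  | [], vis, q => (vis, q)
  | nb :: rest, vis, q =>
      if PySem.Set.contains vis nb then pvBfsNbrs rest vis q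
      else pvBfsNbrs rest (PySem.Set.add vis nb) (q ++ [nb])

-- 'while queue:' — fuel is ample: each step pops one node and every node is enqueued
-- at most once, so at most (number of nodes) steps happen
def pvBfs (g : PySem.Dict String (List String)) :
    Nat → List String → PySem.Set String → PySem.Set String
  | 0, _, vis => vis
  | _+1, [], vis => vis
  | fuel+1, node :: rest, vis =>
      let st := pvBfsNbrs (g.getD node []) vis rest
      pvBfs g fuel st.2 st.1

def is_polytree (edges : List (String × String)) : Bool :=
  if pvHasCycles edges then false
  else
    let st := pvBuildUG edges
    match st.1 with
    | [] => true
    | start :: _ =>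
        let visited := pvBfs st.2 (st.1.length + 1) [start]
          (PySem.Set.add PySem.Set.empty start)
        (PySem.List.len visited == PySem.List.len st.1) &&
        (PySem.List.len edges == PySem.List.len st.1 - 1)

-- ===== PORT B =====
-- '{k: (ra if v == rb else v) for k, v in comp.items()}'
def pvRelabel (comp : PySem.Dict String String) (rb ra : String) :
    PySem.Dict String String :=
  PySem.Dict.mk (comp.items.map (fun p => if p.2 == rb then (p.1, ra) else p))

-- the for-loop of B with its early 'return False' (none = returned False)
def pvUF : List (String × String) → PySem.Dict String String →
    Option (PySem.Dict String String)
  | [], comp => some comp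
  | (a, b) :: rest, comp =>
      let ra := comp.getD a a
      let c1 := comp.setdefault a a
      let rb := c1.getD b b
      let c2 := c1.setdefault b b
      if ra == rb then none
      else pvUF rest (pvRelabel c2 rb ra)

def is_polytree_alt (edges : List (String × String)) : Bool :=
  match pvUF edges PySem.Dict.empty with
  | none => false
  | some comp => decide ((PySem.Set.ofList comp.values).length ≤ 1)

-- ===== PRECONDITION & SPEC =====
def Spec_is_polytree (edges : List (String × String)) (out : Bool) : Prop := out = is_polytree_alt edges
instance (edges : List (String × String)) (out : Bool) : Decidable (Spec_is_polytree edges out) := by unfold Spec_is_polytree; infer_instance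

-- ===== CLAIM (what is proved, stated in full; the proofs are below) =====
def Claim_equal_is_polytree : Prop := ∀ (edges : List (String × String)), Dom_is_polytree edges → Spec_is_polytree edges (is_polytree edges)

-- ===== LEMMAS AND PROOFS =====

-- ---------- semantic notions ----------

def pvAdj (E : List (String × String)) (x y : String) : Prop := (x, y) ∈ E ∨ (y, x) ∈ E

def pvConn (E : List (String × String)) : String → String → Prop :=
  Relation.ReflTransGen (pvAdj E)

def pvNodes (E : List (String × String)) : PySem.Set String :=
  E.foldl (fun s e => PySem.Set.add (PySem.Set.add s e.1) e.2) []

def pvDReach (E : List (String × String)) : String → String → Prop :=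
  Relation.ReflTransGen (fun x y => (x, y) ∈ E)

def pvCycle (E : List (String × String)) : Prop := ∃ x y, (x, y) ∈ E ∧ pvDReach E y x

def pvBad (E : List (String × String)) : Prop :=
  ∃ j, ∃ h : j < E.length, pvConn (E.take j) E[j].1 E[j].2

def pvAllConn (E : List (String × String)) : Prop :=
  ∀ x ∈ pvNodes E, ∀ y ∈ pvNodes E, pvConn E x y

-- ---------- generic facts ----------

theorem pvAdj_symm {E : List (String × String)} {x y : String} (h : pvAdj E x y) :
    pvAdj E y x := h.elim .inr .inl

theorem pvConn_symm {E : List (String × String)} {x y : String} (h : pvConn E x y) :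
    pvConn E y x := by
  induction h with
  | refl => exact .refl
  | tail _ hadj ih =>
      exact (Relation.ReflTransGen.single (pvAdj_symm hadj)).trans ih

theorem pvConn_mono {E F : List (String × String)} (hEF : ∀ p ∈ E, p ∈ F)
    {x y : String} (h : pvConn E x y) : pvConn F x y := by
  refine Relation.ReflTransGen.mono ?_ h
  intro a b hab
  exact hab.elim (fun h1 => .inl (hEF _ h1)) (fun h1 => .inr (hEF _ h1))

theorem mem_pvNodes_aux (E : List (String × String)) (s : PySem.Set String) (x : String) :
    x ∈ E.foldl (fun s e => PySem.Set.add (PySem.Set.add s e.1) e.2) s ↔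
      x ∈ s ∨ ∃ e ∈ E, x = e.1 ∨ x = e.2 := by
  induction E generalizing s with
  | nil => simp
  | cons e E ih =>
      simp only [List.foldl_cons, ih, PySem.Set.mem_add, List.mem_cons]
      constructor
      · rintro (((h | h) | h) | h)
        · exact .inl h
        · exact .inr ⟨e, .inl rfl, .inl h⟩
        · exact .inr ⟨e, .inl rfl, .inr h⟩
        · obtain ⟨f, hf, hx⟩ := h
          exact .inr ⟨f, .inr hf, hx⟩
      · rintro (h | ⟨f, (rfl | hf), hx⟩)
        · exact .inl (.inl (.inl h))
        · exact hx.elim (fun h => .inl (.inl (.inr h))) (fun h => .inl (.inr h))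
        · exact .inr ⟨f, hf, hx⟩

theorem mem_pvNodes {E : List (String × String)} {x : String} :
    x ∈ pvNodes E ↔ ∃ e ∈ E, x = e.1 ∨ x = e.2 := by
  simpa using mem_pvNodes_aux E [] x

theorem nodup_pvNodes_aux (E : List (String × String)) (s : PySem.Set String)
    (hs : s.Nodup) :
    (E.foldl (fun s e => PySem.Set.add (PySem.Set.add s e.1) e.2) s).Nodup := by
  induction E generalizing s with
  | nil => exact hs
  | cons e E ih =>
      refine ih _ ?_
      exact PySem.Set.nodup_add _ e.2 (PySem.Set.nodup_add s e.1 hs)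

theorem nodup_pvNodes (E : List (String × String)) : (pvNodes E).Nodup :=
  nodup_pvNodes_aux E [] List.nodup_nil

theorem pvNodes_append_pair (E : List (String × String)) (e : String × String) :
    pvNodes (E ++ [e]) = PySem.Set.add (PySem.Set.add (pvNodes E) e.1) e.2 := by
  simp [pvNodes, List.foldl_append]

-- the one-step extension of undirected connectivity by one more edge
theorem pvConn_append_pair {E : List (String × String)} {a b x y : String} :
    pvConn (E ++ [(a, b)]) x y ↔
      pvConn E x y ∨ (pvConn E x a ∧ pvConn E b y) ∨ (pvConn E x b ∧ pvConn E a y) := by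
  constructor
  · intro h
    induction h with
    | refl => exact .inl .refl
    | tail _ hadj ih =>
        rename_i w y' _
        have hcases : pvAdj E w y' ∨ (w = a ∧ y' = b) ∨ (w = b ∧ y' = a) := by
          rcases hadj with h1 | h1
          · rcases List.mem_append.1 h1 with h2 | h2
            · exact .inl (.inl h2)
            · have : (w, y') = (a, b) := by simpa using h2
              exact .inr (.inl ⟨congrArg Prod.fst this, congrArg Prod.snd this⟩)
          · rcases List.mem_append.1 h1 with h2 | h2
            · exact .inl (.inr h2)
            · have : (y', w) = (a, b) := by simpa using h2
              exact .inr (.inr ⟨congrArg Prod.snd this, congrArg Prod.fst this⟩)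
        rcases hcases with h1 | ⟨rfl, rfl⟩ | ⟨rfl, rfl⟩
        · have hstep : pvConn E w y' := Relation.ReflTransGen.single h1
          rcases ih with h2 | ⟨h2, h3⟩ | ⟨h2, h3⟩
          · exact .inl (h2.trans hstep)
          · exact .inr (.inl ⟨h2, h3.trans hstep⟩)
          · exact .inr (.inr ⟨h2, h3.trans hstep⟩)
        · rcases ih with h2 | ⟨h2, h3⟩ | ⟨h2, h3⟩
          · exact .inr (.inl ⟨h2, .refl⟩)
          · exact .inr (.inl ⟨h2, .refl⟩)
          · exact .inl h2
        · rcases ih with h2 | ⟨h2, h3⟩ | ⟨h2, h3⟩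
          · exact .inr (.inr ⟨h2, .refl⟩)
          · exact .inl h2
          · exact .inr (.inr ⟨h2, .refl⟩)
  · have hsub : ∀ p ∈ E, p ∈ E ++ [(a, b)] := fun p hp => List.mem_append.2 (.inl hp)
    have hnew : pvConn (E ++ [(a, b)]) a b :=
      Relation.ReflTransGen.single (.inl (List.mem_append.2 (.inr List.mem_cons_self)))
    rintro (h | ⟨h1, h2⟩ | ⟨h1, h2⟩)
    · exact pvConn_mono hsub h
    · exact ((pvConn_mono hsub h1).trans hnew).trans (pvConn_mono hsub h2)
    · exact ((pvConn_mono hsub h1).trans (pvConn_symm hnew)).trans (pvConn_mono hsub h2)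

theorem pvConn_append_pair_of_conn {E : List (String × String)} {a b x y : String}
    (hab : pvConn E a b) : pvConn (E ++ [(a, b)]) x y ↔ pvConn E x y := by
  rw [pvConn_append_pair]
  constructor
  · rintro (h | ⟨h1, h2⟩ | ⟨h1, h2⟩)
    · exact h
    · exact h1.trans (hab.trans h2)
    · exact h1.trans ((pvConn_symm hab).trans h2)
  · exact .inl

-- ---------- directed walks ----------

inductive pvWalk : List (String × String) → String → String → Prop
  | nil (x : String) : pvWalk [] x x
  | cons {x y z : String} {l : List (String × String)} :
      pvWalk l y z → pvWalk ((x, y) :: l) x z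

theorem pvWalk_append {l1 l2 : List (String × String)} {x y z : String}
    (h1 : pvWalk l1 x y) (h2 : pvWalk l2 y z) : pvWalk (l1 ++ l2) x z := by
  induction h1 with
  | nil => exact h2
  | cons _ ih => exact .cons (ih h2)

theorem pvWalk_split {l1 l2 : List (String × String)} {x z : String}
    (h : pvWalk (l1 ++ l2) x z) : ∃ y, pvWalk l1 x y ∧ pvWalk l2 y z := by
  induction l1 generalizing x with
  | nil => exact ⟨x, .nil x, h⟩
  | cons p l1 ih =>
      cases h with
      | cons h' =>
          obtain ⟨y, hy1, hy2⟩ := ih h'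
          exact ⟨y, .cons hy1, hy2⟩

theorem pvDReach_walk {E : List (String × String)} {y x : String} (h : pvDReach E y x) :
    ∃ l, pvWalk l y x ∧ ∀ p ∈ l, p ∈ E := by
  induction h with
  | refl => exact ⟨[], .nil y, by simp⟩
  | tail _ hstep ih =>
      obtain ⟨l, hw, hl⟩ := ih
      rename_i b c _
      refine ⟨l ++ [(b, c)], pvWalk_append hw (.cons (.nil c)), ?_⟩
      intro p hp
      rcases List.mem_append.1 hp with h1 | h1
      · exact hl _ h1
      · have hp : p = (b, c) := by simpa using h1
        rw [hp]; exact hstep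

theorem pvWalk_conn {l F : List (String × String)} {x y : String}
    (h : pvWalk l x y) (hl : ∀ p ∈ l, p ∈ F) : pvConn F x y := by
  induction h with
  | nil => exact .refl
  | cons h' ih =>
      rename_i a b c l'
      refine Relation.ReflTransGen.trans (Relation.ReflTransGen.single ?_) (ih ?_)
      · exact .inl (hl _ (List.mem_cons_self))
      · exact fun p hp => hl _ (List.mem_cons_of_mem _ hp)

-- cut a walk at the first occurrence of the pair (a, b)
theorem pvWalk_first (a b : String) {W : List (String × String)} {u v : String}
    (h : pvWalk W u v) :
    ∃ D, (a, b) ∉ D ∧ (∀ p ∈ D, p ∈ W) ∧ (pvWalk D u v ∨ pvWalk D u a) := by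
  induction h with
  | nil => exact ⟨[], by simp, by simp, .inl (.nil _)⟩
  | cons h' ih =>
      rename_i x y z l
      by_cases hxy : (x, y) = (a, b)
      · have hx : x = a := congrArg Prod.fst hxy
        subst hx
        exact ⟨[], by simp, by simp, .inr (.nil _)⟩
      · obtain ⟨D, hD1, hD2, hD3⟩ := ih
        refine ⟨(x, y) :: D, ?_, ?_, ?_⟩
        · simp only [List.mem_cons, not_or]
          exact ⟨fun h => hxy h.symm, hD1⟩
        · intro p hp
          rcases List.mem_cons.1 hp with rfl | hp
          · exact List.mem_cons_self
          · exact List.mem_cons_of_mem _ (hD2 _ hp)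
        · exact hD3.elim (fun h => .inl (.cons h)) (fun h => .inr (.cons h))

theorem pvList_exists_max {β : Type} (f : β → Nat) (C : List β) (hC : C ≠ []) :
    ∃ p ∈ C, ∀ q ∈ C, f q ≤ f p := by
  induction C with
  | nil => exact absurd rfl hC
  | cons c C ih =>
      rcases C.eq_nil_or_concat' with rfl | h
      · exact ⟨c, by simp⟩
      · obtain ⟨p, hp, hmax⟩ := ih (by
          rintro rfl
          obtain ⟨l, a, ha⟩ := h
          exact List.concat_ne_nil a l ha.symm)
        by_cases hc : f c ≤ f p
        · exact ⟨p, List.mem_cons_of_mem _ hp, by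
            intro q hq
            rcases List.mem_cons.1 hq with rfl | hq
            · exact hc
            · exact hmax _ hq⟩
        · exact ⟨c, List.mem_cons_self, by
            intro q hq
            rcases List.mem_cons.1 hq with rfl | hq
            · exact le_refl _
            · exact le_trans (hmax _ hq) (le_of_not_ge hc)⟩

theorem pvCycle_bad {E : List (String × String)} (h : pvCycle E) : pvBad E := by
  obtain ⟨x, y, hxy, hreach⟩ := h
  obtain ⟨l, hw, hl⟩ := pvDReach_walk hreach
  have hwC : pvWalk ((x, y) :: l) x x := .cons hw
  have hlC : ∀ p ∈ (x, y) :: l, p ∈ E := by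
    intro p hp
    rcases List.mem_cons.1 hp with rfl | hp
    · exact hxy
    · exact hl _ hp
  obtain ⟨p0, hp0C, hmax⟩ := pvList_exists_max (fun p => E.idxOf p) ((x, y) :: l) (by simp)
  obtain ⟨a, b⟩ := p0
  have hp0E : (a, b) ∈ E := hlC _ hp0C
  have hjlt : E.idxOf (a, b) < E.length := List.idxOf_lt_length_of_mem hp0E
  have hEj : E[E.idxOf (a, b)] = (a, b) := List.getElem_idxOf hjlt
  obtain ⟨C1, C2, hsplit⟩ := List.append_of_mem hp0C
  rw [hsplit] at hwC
  obtain ⟨u, hu1, hu2⟩ := pvWalk_split hwC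
  cases hu2 with
  | cons hw2 =>
    have hrot : pvWalk (C2 ++ C1) b a := pvWalk_append hw2 hu1
    obtain ⟨D, hD1, hD2, hD3⟩ := pvWalk_first a b hrot
    have hwD : pvWalk D b a := by
      rcases hD3 with h | h
      · exact h
      · exact h
    have hDsteps : ∀ p ∈ D, p ∈ E.take (E.idxOf (a, b)) := by
      intro p hp
      have hpC : p ∈ (x, y) :: l := by
        rw [hsplit]
        rcases List.mem_append.1 (hD2 _ hp) with h1 | h1
        · exact List.mem_append.2 (.inr (List.mem_cons_of_mem _ h1))
        · exact List.mem_append.2 (.inl h1)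
      have hpE : p ∈ E := hlC _ hpC
      have hle : E.idxOf p ≤ E.idxOf (a, b) := hmax _ hpC
      have hgi : E[E.idxOf p]'(List.idxOf_lt_length_of_mem hpE) = p :=
        List.getElem_idxOf _
      have hne : E.idxOf p ≠ E.idxOf (a, b) := by
        intro heq
        apply hD1
        have : p = (a, b) := by
          conv_lhs => rw [← hgi]
          simp_rw [heq]
          exact hEj
        exact this ▸ hp
      have hlt : E.idxOf p < E.idxOf (a, b) := lt_of_le_of_ne hle hne
      have hmemtake : (E.take (E.idxOf (a, b)))[E.idxOf p]'(by
          rw [List.length_take]; omega) = p := by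
        rw [List.getElem_take]; exact hgi
      exact hmemtake ▸ List.getElem_mem _
    refine ⟨E.idxOf (a, b), hjlt, ?_⟩
    rw [hEj]
    exact pvConn_symm (pvWalk_conn hwD hDsteps)

-- ---------- graph-building ports, characterised ----------

theorem pvBuildDG_eq (E : List (String × String)) :
    pvBuildDG E =
      (E.foldl (fun d p => d.modify p.1 [] (· ++ [p.2])) PySem.Dict.empty, pvNodes E) := by
  unfold pvBuildDG pvNodes
  exact PySem.List.foldl_prod_mk
    (fun d (p : String × String) => d.modify p.1 [] (· ++ [p.2]))
    (fun s (e : String × String) => PySem.Set.add (PySem.Set.add s e.1) e.2) E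
    PySem.Dict.empty PySem.Set.empty

theorem mem_dgraph {E : List (String × String)} {x nb : String} :
    nb ∈ (pvBuildDG E).1.getD x [] ↔ (x, nb) ∈ E := by
  rw [pvBuildDG_eq]
  rw [show ((E.foldl (fun d p => d.modify p.1 [] (· ++ [p.2])) PySem.Dict.empty, pvNodes E)).1
      = E.foldl (fun d p => d.modify p.1 [] (· ++ [p.2])) PySem.Dict.empty from rfl]
  rw [PySem.Dict.getD_foldl_modify_append E PySem.Dict.empty x]
  simp only [PySem.Dict.getD_empty, List.nil_append, List.mem_map, List.mem_filter]
  constructor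
  · rintro ⟨p, ⟨hp, hpx⟩, hp2⟩
    have : p = (x, nb) := by
      obtain ⟨p1, p2⟩ := p
      simp only [beq_iff_eq] at hpx
      simp_all
    exact this ▸ hp
  · intro h
    exact ⟨(x, nb), ⟨h, by simp⟩, rfl⟩

theorem pvUG_flat (E : List (String × String)) :
    ∀ d : PySem.Dict String (List String),
      E.foldl (fun d e => (d.modify e.1 [] (fun l => l ++ [e.2])).modify e.2 [] (fun l => l ++ [e.1])) d =
      (E.flatMap fun e => [(e.1, e.2), (e.2, e.1)]).foldl
        (fun d p => d.modify p.1 [] (· ++ [p.2])) d := by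
  induction E with
  | nil => intro d; simp
  | cons e E ih =>
      intro d
      simp only [List.foldl_cons, List.flatMap_cons, List.foldl_append]
      rw [ih]
      rfl

theorem pvBuildUG_eq (E : List (String × String)) :
    pvBuildUG E =
      (pvNodes E,
        (E.flatMap fun e => [(e.1, e.2), (e.2, e.1)]).foldl
          (fun d p => d.modify p.1 [] (· ++ [p.2])) PySem.Dict.empty) := by
  have h := PySem.List.foldl_prod_mk
    (fun s (e : String × String) => PySem.Set.add (PySem.Set.add s e.1) e.2)
    (fun d (e : String × String) =>
      (d.modify e.1 [] (fun l => l ++ [e.2])).modify e.2 [] (fun l => l ++ [e.1]))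
    E PySem.Set.empty PySem.Dict.empty
  unfold pvBuildUG pvNodes
  rw [h, pvUG_flat]
  rfl

theorem mem_ugraph {E : List (String × String)} {x nb : String} :
    nb ∈ (pvBuildUG E).2.getD x [] ↔ pvAdj E x nb := by
  have hsnd : (pvBuildUG E).2 = (E.flatMap fun e => [(e.1, e.2), (e.2, e.1)]).foldl
      (fun d p => d.modify p.1 [] (· ++ [p.2])) PySem.Dict.empty := by
    rw [pvBuildUG_eq]
  rw [hsnd, PySem.Dict.getD_foldl_modify_append _ PySem.Dict.empty x]
  simp only [PySem.Dict.getD_empty, List.nil_append, List.mem_map, List.mem_filter,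
    List.mem_flatMap]
  constructor
  · rintro ⟨⟨p1, p2⟩, ⟨⟨⟨e1, e2⟩, he, hpe⟩, hpx⟩, hp2⟩
    simp only [List.mem_cons, List.not_mem_nil, or_false, Prod.mk.injEq] at hpe
    simp only [beq_iff_eq] at hpx
    dsimp only at hpx hp2
    rcases hpe with ⟨h1, h2⟩ | ⟨h1, h2⟩
    · subst h1; subst h2; subst hpx; subst hp2; exact .inl he
    · subst h1; subst h2; subst hpx; subst hp2; exact .inr he
  · rintro (h | h)
    · exact ⟨(x, nb), ⟨⟨(x, nb), h, by simp⟩, by simp⟩, rfl⟩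
    · exact ⟨(x, nb), ⟨⟨(nb, x), h, by simp⟩, by simp⟩, rfl⟩

-- ---------- DFS cycle-detector soundness ----------

theorem pvSet_discard_add_self {s : PySem.Set String} {x : String} (hx : x ∉ s) :
    PySem.Set.discard (PySem.Set.add s x) x = s := by
  rw [PySem.Set.add_of_not_mem hx]
  simp only [PySem.Set.discard, List.filter_append]
  rw [show List.filter (fun y => !y == x) [x] = [] by simp]
  rw [List.filter_eq_self.2 (by
    intro y hy
    simp only [Bool.not_eq_eq_eq_not]
    simpa using fun h : y = x => hx (h ▸ hy))]
  simp

def pvDfsOk (E : List (String × String)) (rst : PySem.Set String)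
    (vis : PySem.Set String)
    (res : PySem.Set String × PySem.Set String × Bool) : Prop :=
  (res.2.2 = true → pvCycle E) ∧
  (res.2.2 = false → res.2.1 = rst ∧ ∀ x ∈ vis, x ∈ res.1)

theorem pvDfs_sound {E : List (String × String)} {g : PySem.Dict String (List String)}
    (hg : ∀ x nb, nb ∈ g.getD x [] ↔ (x, nb) ∈ E) :
    ∀ fuel node vis rst,
      (∀ s ∈ rst, s ∈ vis) → (∀ s ∈ rst, pvDReach E s node) → node ∉ vis →
      pvDfsOk E rst vis (pvDfs g fuel node vis rst) := by
  intro fuel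
  induction fuel with
  | zero =>
      intro node vis rst _ _ _
      simp [pvDfs, pvDfsOk]
  | succ fuel ih =>
      have ihL : ∀ ns node vis rst, (∀ nb ∈ ns, (node, nb) ∈ E) → (∀ s ∈ rst, s ∈ vis) →
          (∀ s ∈ rst, pvDReach E s node) →
          ((pvDfsL g fuel ns node vis rst).2.2 = true → pvCycle E) ∧
          ((pvDfsL g fuel ns node vis rst).2.2 = false →
            (pvDfsL g fuel ns node vis rst).2.1 = PySem.Set.discard rst node ∧
            ∀ x ∈ vis, x ∈ (pvDfsL g fuel ns node vis rst).1) := by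
        intro ns
        induction ns with
        | nil =>
            intro node vis rst _ _ _
            simp [pvDfsL]
        | cons nb rest ihns =>
            intro node vis rst hns hsub hreach
            by_cases hv : nb ∈ vis
            · by_cases hr : nb ∈ rst
              · have hcyc : pvCycle E := ⟨node, nb, hns _ List.mem_cons_self,
                  hreach _ hr⟩
                refine ⟨fun _ => hcyc, fun hfl => ?_⟩
                simp [pvDfsL, hv, hr] at hfl
              · have hrec := ihns node vis rst
                  (fun n hn => hns _ (List.mem_cons_of_mem _ hn)) hsub hreach
                simpa [pvDfsL, hv, hr] using hrec
            · have hnbvis : nb ∉ vis := hv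
              have hdfs := ih nb vis rst hsub
                (fun s hs => (hreach s hs).tail (hns _ List.mem_cons_self)) hnbvis
              rcases hres : pvDfs g fuel nb vis rst with ⟨vis', rst', flag⟩
              rw [hres] at hdfs
              cases flag
              · obtain ⟨hrst', hmono⟩ := hdfs.2 rfl
                simp only at hrst' hmono
                rw [hrst'] at hres
                have hrec := ihns node vis' rst
                  (fun n hn => hns _ (List.mem_cons_of_mem _ hn))
                  (fun s hs => hmono _ (hsub s hs)) hreach
                rw [show pvDfsL g fuel (nb :: rest) node vis rst
                    = pvDfsL g fuel rest node vis' rst by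
                  simp [pvDfsL, hv, hres]]
                exact ⟨hrec.1, fun hfl =>
                  ⟨(hrec.2 hfl).1, fun x hx => (hrec.2 hfl).2 x (hmono x hx)⟩⟩
              · have hcyc : pvCycle E := hdfs.1 rfl
                refine ⟨fun _ => hcyc, fun hfl => ?_⟩
                simp [pvDfsL, hv, hres] at hfl
      intro node vis rst hsub hreach hnode
      have hnrst : node ∉ rst := fun h => hnode (hsub _ h)
      have hmain := ihL (g.getD node []) node (PySem.Set.add vis node)
        (PySem.Set.add rst node)
        (fun nb h => (hg node nb).1 h)
        (by
          intro s hs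
          rcases (PySem.Set.mem_add _ _ _).1 hs with h | rfl
          · exact (PySem.Set.mem_add _ _ _).2 (.inl (hsub _ h))
          · exact (PySem.Set.mem_add _ _ _).2 (.inr rfl))
        (by
          intro s hs
          rcases (PySem.Set.mem_add _ _ _).1 hs with h | rfl
          · exact hreach _ h
          · exact .refl)
      have hdef : pvDfs g (fuel + 1) node vis rst
          = pvDfsL g fuel (g.getD node []) node (PySem.Set.add vis node)
              (PySem.Set.add rst node) := by
        simp [pvDfs]
      rw [pvDfsOk, hdef]
      refine ⟨hmain.1, fun hfl => ?_⟩
      obtain ⟨h1, h2⟩ := hmain.2 hfl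
      refine ⟨by rw [h1, pvSet_discard_add_self hnrst], fun x hx =>
        h2 x ((PySem.Set.mem_add _ _ _).2 (.inl hx))⟩

theorem pvCycleScan_sound {E : List (String × String)} {g : PySem.Dict String (List String)}
    (hg : ∀ x nb, nb ∈ g.getD x [] ↔ (x, nb) ∈ E) :
    ∀ fuel ns vis, pvCycleScan g fuel ns vis [] = true → pvCycle E := by
  intro fuel ns
  induction ns with
  | nil => intro vis h; simp [pvCycleScan] at h
  | cons n rest ih =>
      intro vis h
      by_cases hv : n ∈ vis
      · exact ih vis (by simpa [pvCycleScan, hv] using h)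
      · have hnvis : n ∉ vis := hv
        have hdfs := pvDfs_sound hg fuel n vis [] (by simp) (by simp) hnvis
        rcases hres : pvDfs g fuel n vis [] with ⟨vis', rst', flag⟩
        rw [hres] at hdfs
        cases flag
        · obtain ⟨hrst', _⟩ := hdfs.2 rfl
          simp only at hrst'
          rw [hrst'] at hres
          exact ih vis' (by simpa [pvCycleScan, hv, hres] using h)
        · exact hdfs.1 rfl

theorem pvHasCycles_sound {E : List (String × String)} (h : pvHasCycles E = true) :
    pvCycle E := by
  have hg : ∀ x nb, nb ∈ (pvBuildDG E).1.getD x [] ↔ (x, nb) ∈ E := fun x nb => mem_dgraph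
  exact pvCycleScan_sound hg _ _ _ (by simpa [pvHasCycles] using h)

-- ---------- the quick-find ghost run ----------

def pvRootD (c : PySem.Dict String String) (x : String) : String := c.getD x x

def pvStep (c : PySem.Dict String String) (e : String × String) :
    PySem.Dict String String × Bool :=
  let ra := c.getD e.1 e.1
  let c1 := c.setdefault e.1 e.1
  let rb := c1.getD e.2 e.2
  let c2 := c1.setdefault e.2 e.2
  if ra == rb then (c2, false) else (pvRelabel c2 rb ra, true)

def pvStepF (s : PySem.Dict String String × Nat) (e : String × String) :
    PySem.Dict String String × Nat :=
  let t := pvStep s.1 e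
  (t.1, if t.2 then s.2 + 1 else s.2)

def pvRunF (E : List (String × String)) (s : PySem.Dict String String × Nat) :
    PySem.Dict String String × Nat := E.foldl pvStepF s

def pvRun (E : List (String × String)) : PySem.Dict String String × Nat :=
  pvRunF E (PySem.Dict.empty, 0)

theorem pvRunF_append (E1 E2 : List (String × String)) (s) :
    pvRunF (E1 ++ E2) s = pvRunF E2 (pvRunF E1 s) := List.foldl_append ..

theorem pvRunF_offset (E : List (String × String)) (c : PySem.Dict String String) (m : Nat) :
    pvRunF E (c, m) = ((pvRunF E (c, 0)).1, (pvRunF E (c, 0)).2 + m) := by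
  induction E generalizing c m with
  | nil => simp [pvRunF]
  | cons e E ih =>
      simp only [pvRunF, List.foldl_cons] at *
      by_cases h : (pvStep c e).2
      · rw [show pvStepF (c, m) e = ((pvStep c e).1, m + 1) by simp [pvStepF, h],
           show pvStepF (c, 0) e = ((pvStep c e).1, 0 + 1) by simp [pvStepF, h],
           ih, ih ((pvStep c e).1) 1]
        simp; omega
      · rw [show pvStepF (c, m) e = ((pvStep c e).1, m) by simp [pvStepF, h],
           show pvStepF (c, 0) e = ((pvStep c e).1, 0) by simp [pvStepF, h], ih]

theorem pvRunF_le (E : List (String × String)) (c : PySem.Dict String String) :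
    (pvRunF E (c, 0)).2 ≤ E.length := by
  induction E generalizing c with
  | nil => simp [pvRunF]
  | cons e E ih =>
      simp only [pvRunF, List.foldl_cons]
      by_cases h : (pvStep c e).2
      · rw [show pvStepF (c, 0) e = ((pvStep c e).1, 0 + 1) by simp [pvStepF, h]]
        have := pvRunF_offset E (pvStep c e).1 1
        simp only [pvRunF] at this ⊢
        rw [this]
        simpa using ih (pvStep c e).1
      · rw [show pvStepF (c, 0) e = ((pvStep c e).1, 0) by simp [pvStepF, h]]
        exact le_trans (ih _) (by simp)


-- ---------- quick-find step lemmas ----------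

theorem pvRootD_setdefault (c : PySem.Dict String String) (a x : String) :
    pvRootD (c.setdefault a a) x = pvRootD c x := by
  unfold pvRootD
  by_cases hc : c.contains a = true
  · rw [PySem.Dict.setdefault_of_contains c a hc]
  · rw [PySem.Dict.setdefault_of_not_contains c a (by simpa using hc)]
    by_cases hx : x = a
    · subst hx
      rw [PySem.Dict.getD_insert_self, PySem.Dict.getD_of_not_contains c x (by simpa using hc)]
    · rw [PySem.Dict.getD_insert_of_ne c a x hx]

theorem pvKeys_setdefault (c : PySem.Dict String String) (a : String) :
    (c.setdefault a a).keys = PySem.Set.add c.keys a := by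
  by_cases hc : c.contains a = true
  · rw [PySem.Dict.setdefault_of_contains c a hc,
      PySem.Set.add_of_mem ((PySem.Dict.contains_iff_mem_keys c a).1 hc)]
  · rw [PySem.Dict.setdefault_of_not_contains c a (by simpa using hc),
      PySem.Dict.keys_insert_of_not_contains c a (by simpa using hc),
      PySem.Set.add_of_not_mem (fun h => hc ((PySem.Dict.contains_iff_mem_keys c a).2 h))]

theorem pvItems_setdefault (c : PySem.Dict String String) (a : String) :
    (c.setdefault a a).items = c.items ∨
      ((c.setdefault a a).items = c.items ++ [(a, a)] ∧ a ∉ c.keys) := by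
  by_cases hc : c.contains a = true
  · rw [PySem.Dict.setdefault_of_contains c a hc]; exact .inl rfl
  · rw [PySem.Dict.setdefault_of_not_contains c a (by simpa using hc)]
    refine .inr ⟨?_, fun h => hc ((PySem.Dict.contains_iff_mem_keys c a).2 h)⟩
    exact PySem.Dict.items_insert_of_not_contains c a (by simpa using hc)

theorem pvRelabel_keys (c : PySem.Dict String String) (rb ra : String) :
    (pvRelabel c rb ra).keys = c.keys := by
  simp only [pvRelabel, PySem.Dict.keys, List.map_map]
  apply List.map_congr_left
  intro p _
  by_cases h : p.2 = rb <;> simp [h]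

theorem pvRelabel_get? (c : PySem.Dict String String) (rb ra x : String) :
    (pvRelabel c rb ra).get? x = (c.get? x).map (fun v => if v == rb then ra else v) := by
  simp only [pvRelabel, PySem.Dict.get?]
  rw [List.find?_map]
  have hpred : ((fun p : String × String => p.1 == x) ∘
      (fun p : String × String => if p.2 == rb then (p.1, ra) else p)) =
      (fun p : String × String => p.1 == x) := by
    funext p
    by_cases h : p.2 = rb <;> simp [h]
  rw [hpred, Option.map_map, Option.map_map]
  congr 1
  funext p
  by_cases h : p.2 = rb <;> simp [h]

theorem pvRelabel_values (c : PySem.Dict String String) (rb ra : String) :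
    (pvRelabel c rb ra).values = c.values.map (fun v => if v == rb then ra else v) := by
  simp only [pvRelabel, PySem.Dict.values, List.map_map]
  apply List.map_congr_left
  intro p _
  by_cases h : p.2 = rb <;> simp [h]

theorem pvRootD_relabel (c : PySem.Dict String String) (rb ra x : String)
    (hrb : rb ∈ c.keys) :
    pvRootD (pvRelabel c rb ra) x = if pvRootD c x = rb then ra else pvRootD c x := by
  unfold pvRootD
  rw [PySem.Dict.getD_eq_get?_getD, PySem.Dict.getD_eq_get?_getD, pvRelabel_get?]
  cases hx : c.get? x with
  | none =>
      have hxk : x ∉ c.keys := (PySem.Dict.get?_eq_none_iff_not_mem_keys c x).1 hx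
      have hxrb : x ≠ rb := fun h => hxk (h ▸ hrb)
      simp [hxrb]
  | some v =>
      simp only [Option.map_some, Option.getD_some, beq_iff_eq]

theorem pvOfList_length_eq_card (l : List String) :
    (PySem.Set.ofList l).length = l.toFinset.card := by
  induction l using List.reverseRecOn with
  | nil => simp [PySem.Set.ofList]
  | append_singleton l x ih =>
      rw [PySem.Set.ofList_append_singleton, PySem.Set.add_eq_ite]
      have htf : (l ++ [x]).toFinset = insert x l.toFinset := by
        ext y
        simp
      by_cases hx : x ∈ PySem.Set.ofList l
      · rw [if_pos hx, htf, ih, Finset.card_insert_of_mem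
          (List.mem_toFinset.2 ((PySem.Set.mem_ofList l x).1 hx))]
      · rw [if_neg hx, htf, List.length_append, ih, Finset.card_insert_of_notMem
          (fun h => hx ((PySem.Set.mem_ofList l x).2 (List.mem_toFinset.1 h)))]
        simp

theorem pvListMap_toFinset (l : List String) (f : String → String) :
    (l.map f).toFinset = l.toFinset.image f := by
  ext y
  simp [List.mem_toFinset, Finset.mem_image]

theorem pvCollapse_card (l : List String) (ra rb : String) (hra : ra ∈ l) (hrb : rb ∈ l)
    (hne : ra ≠ rb) :
    (l.map (fun v => if v == rb then ra else v)).toFinset.card + 1 = l.toFinset.card := by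
  rw [pvListMap_toFinset]
  have himg : l.toFinset.image (fun v => if v == rb then ra else v) = l.toFinset.erase rb := by
    ext y
    simp only [Finset.mem_image, Finset.mem_erase, List.mem_toFinset]
    constructor
    · rintro ⟨v, hv, rfl⟩
      by_cases h : v = rb
      · simp only [h, beq_self_eq_true, if_true]
        exact ⟨hne, hra⟩
      · simp only [beq_iff_eq, h, if_false]
        exact ⟨h, hv⟩
    · rintro ⟨hy, hyl⟩
      exact ⟨y, hyl, by simp [hy]⟩
  rw [himg, Finset.card_erase_of_mem (List.mem_toFinset.2 hrb)]
  have hpos : 0 < l.toFinset.card := Finset.card_pos.2 ⟨rb, List.mem_toFinset.2 hrb⟩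
  omega

theorem pvConn_nil {x y : String} : pvConn [] x y ↔ x = y := by
  constructor
  · intro h
    induction h with
    | refl => rfl
    | tail _ hadj ih => rcases hadj with h | h <;> simp at h
  · rintro rfl
    exact .refl

theorem pvBad_nil : ¬ pvBad ([] : List (String × String)) := by
  rintro ⟨j, hj, _⟩
  simp at hj

theorem pvBad_append_pair (E : List (String × String)) (a b : String) :
    pvBad (E ++ [(a, b)]) ↔ pvBad E ∨ pvConn E a b := by
  have hlenE : E.length < (E ++ [(a, b)]).length := by
    simp
  have hgetlast : (E ++ [(a, b)])[E.length]'hlenE = (a, b) := by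
    simp
  constructor
  · rintro ⟨j, hj, hc⟩
    by_cases hjE : j < E.length
    · left
      refine ⟨j, hjE, ?_⟩
      rw [List.take_append_of_le_length (le_of_lt hjE)] at hc
      have hg : (E ++ [(a, b)])[j]'hj = E[j]'hjE := List.getElem_append_left hjE
      rwa [hg] at hc
    · have hjeq : j = E.length := by
        simp only [List.length_singleton, List.length_append] at hj
        omega
      right
      subst hjeq
      rw [List.take_append_of_le_length (le_refl _), List.take_length] at hc
      rwa [hgetlast] at hc
  · rintro (⟨j, hj, hc⟩ | hc)
    · have hjlt : j < (E ++ [(a, b)]).length := by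
        simp only [List.length_append, List.length_singleton]
        omega
      refine ⟨j, hjlt, ?_⟩
      rw [List.take_append_of_le_length (le_of_lt hj)]
      have hg : (E ++ [(a, b)])[j]'hjlt = E[j]'hj := List.getElem_append_left hj
      rw [hg]
      exact hc
    · refine ⟨E.length, hlenE, ?_⟩
      rw [List.take_append_of_le_length (le_refl _), List.take_length, hgetlast]
      exact hc

theorem pvRootD_val (c : PySem.Dict String String) (hnd : c.keys.Nodup) {x : String}
    (hx : x ∈ c.keys) : pvRootD c x ∈ c.values := by
  obtain ⟨p, hp, hpx⟩ := List.mem_map.1 hx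
  obtain ⟨p1, p2⟩ := p
  dsimp only at hpx
  subst hpx
  have hgd := PySem.Dict.getD_of_mem_items c hp hnd p1
  unfold pvRootD
  rw [hgd]
  exact List.mem_map.2 ⟨_, hp, rfl⟩

theorem pvSetdefault_vals_sub (c : PySem.Dict String String) (a : String)
    (hvals : ∀ p ∈ c.items, p.2 ∈ c.keys) :
    ∀ p ∈ (c.setdefault a a).items, p.2 ∈ (c.setdefault a a).keys := by
  intro p hp
  have hkeys : (c.setdefault a a).keys = PySem.Set.add c.keys a := pvKeys_setdefault c a
  rcases pvItems_setdefault c a with h | ⟨h, _⟩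
  · rw [h] at hp
    rw [hkeys]
    exact (PySem.Set.mem_add _ _ _).2 (.inl (hvals p hp))
  · rw [h] at hp
    rw [hkeys]
    rcases List.mem_append.1 hp with h1 | h1
    · exact (PySem.Set.mem_add _ _ _).2 (.inl (hvals p h1))
    · have : p = (a, a) := by simpa using h1
      rw [this]
      exact (PySem.Set.mem_add _ _ _).2 (.inr rfl)

theorem pvSetdefault_val_card (c : PySem.Dict String String) (a : String)
    (hvals : ∀ p ∈ c.items, p.2 ∈ c.keys) :
    (PySem.Set.ofList (c.setdefault a a).values).length + c.keys.length
      = (PySem.Set.ofList c.values).length + (c.setdefault a a).keys.length := by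
  by_cases hc : c.contains a = true
  · rw [PySem.Dict.setdefault_of_contains c a hc]
  · have hna : a ∉ c.keys := fun h => hc ((PySem.Dict.contains_iff_mem_keys c a).2 h)
    rw [PySem.Dict.setdefault_of_not_contains c a (by simpa using hc)]
    have hitems := PySem.Dict.items_insert_of_not_contains c (v := a) (by simpa using hc)
    have hkeys := PySem.Dict.keys_insert_of_not_contains c (a : String) (by simpa using hc)
    have hvalues : (c.insert a a).values = c.values ++ [a] := by
      simp only [PySem.Dict.values, hitems, List.map_append, List.map_cons, List.map_nil]
    have hanv : a ∉ PySem.Set.ofList c.values := by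
      intro h
      obtain ⟨p, hp, hpa⟩ := List.mem_map.1 ((PySem.Set.mem_ofList _ _).1 h)
      exact hna (hpa ▸ hvals p hp)
    rw [hvalues, hkeys, PySem.Set.ofList_append_singleton, PySem.Set.add_of_not_mem hanv]
    simp
    omega

-- the ghost invariant, by induction along the edge list
theorem pvGI (E : List (String × String)) :
    (pvRun E).1.keys = pvNodes E ∧
    (∀ p ∈ (pvRun E).1.items, p.2 ∈ pvNodes E) ∧
    (∀ x y, (pvRootD (pvRun E).1 x = pvRootD (pvRun E).1 y ↔ pvConn E x y)) ∧
    (PySem.Set.ofList (pvRun E).1.values).length + (pvRun E).2 = (pvNodes E).length ∧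
    (pvRun E).2 ≤ E.length ∧
    ((pvRun E).2 = E.length ↔ ¬ pvBad E) := by
  induction E using List.reverseRecOn with
  | nil =>
      refine ⟨rfl, by simp [pvRun, pvRunF, PySem.Dict.empty], ?_, ?_, ?_, ?_⟩
      · intro x y
        rw [pvConn_nil]
        unfold pvRun pvRunF pvRootD
        simp [PySem.Dict.getD_empty]
      · simp [pvRun, pvRunF, PySem.Dict.values, PySem.Dict.empty, PySem.Set.ofList, pvNodes]
      · simp [pvRun, pvRunF]
      · simp [pvRun, pvRunF]
        exact pvBad_nil
  | append_singleton E e ih =>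
      obtain ⟨a, b⟩ := e
      obtain ⟨ih1, ih2, ih3, ih4, ih5, ih6⟩ := ih
      have hndk : (pvRun E).1.keys.Nodup := ih1 ▸ nodup_pvNodes E
      have hrun : pvRun (E ++ [(a, b)]) = pvStepF (pvRun E) (a, b) := by
        rw [pvRun, pvRunF_append]
        rfl
      have hnodes' : pvNodes (E ++ [(a, b)]) =
          PySem.Set.add (PySem.Set.add (pvNodes E) a) b := pvNodes_append_pair E (a, b)
      have hc1keys : ((pvRun E).1.setdefault a a).keys = PySem.Set.add (pvRun E).1.keys a :=
        pvKeys_setdefault _ a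
      have hc2keys : (((pvRun E).1.setdefault a a).setdefault b b).keys
          = PySem.Set.add (PySem.Set.add (pvRun E).1.keys a) b := by
        rw [pvKeys_setdefault _ b, hc1keys]
      have hkeys' : (((pvRun E).1.setdefault a a).setdefault b b).keys
          = pvNodes (E ++ [(a, b)]) := by
        rw [hc2keys, ih1, hnodes']
      have hroot2 : ∀ x, pvRootD (((pvRun E).1.setdefault a a).setdefault b b) x
          = pvRootD (pvRun E).1 x := by
        intro x
        rw [pvRootD_setdefault _ b x, pvRootD_setdefault _ a x]
      have hvals1 : ∀ p ∈ ((pvRun E).1.setdefault a a).items,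
          p.2 ∈ ((pvRun E).1.setdefault a a).keys :=
        pvSetdefault_vals_sub _ a (fun p hp => ih1 ▸ ih2 p hp)
      have hvals2 : ∀ p ∈ (((pvRun E).1.setdefault a a).setdefault b b).items,
          p.2 ∈ (((pvRun E).1.setdefault a a).setdefault b b).keys :=
        pvSetdefault_vals_sub _ b hvals1
      have hvals2' : ∀ p ∈ (((pvRun E).1.setdefault a a).setdefault b b).items,
          p.2 ∈ pvNodes (E ++ [(a, b)]) := fun p hp => hkeys' ▸ hvals2 p hp
      have hndk2 : (((pvRun E).1.setdefault a a).setdefault b b).keys.Nodup :=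
        hkeys' ▸ nodup_pvNodes (E ++ [(a, b)])
      have hra : (pvRun E).1.getD a a = pvRootD (pvRun E).1 a := rfl
      have hrb : ((pvRun E).1.setdefault a a).getD b b = pvRootD (pvRun E).1 b :=
        pvRootD_setdefault _ a b
      have hcond : ((pvRun E).1.getD a a == ((pvRun E).1.setdefault a a).getD b b) = true
          ↔ pvConn E a b := by
        rw [beq_iff_eq, hra, hrb]
        exact ih3 a b
      have hcard2 : (PySem.Set.ofList (((pvRun E).1.setdefault a a).setdefault b b).values).length
          + (pvRun E).1.keys.length
          = (PySem.Set.ofList (pvRun E).1.values).length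
          + (((pvRun E).1.setdefault a a).setdefault b b).keys.length := by
        have h1 := pvSetdefault_val_card (pvRun E).1 a (fun p hp => ih1 ▸ ih2 p hp)
        have h2 := pvSetdefault_val_card ((pvRun E).1.setdefault a a) b hvals1
        omega
      have hklen : (pvRun E).1.keys.length = (pvNodes E).length := by rw [ih1]
      have hklen2 : (((pvRun E).1.setdefault a a).setdefault b b).keys.length
          = (pvNodes (E ++ [(a, b)])).length := by rw [hkeys']
      -- where the roots live
      have hmema : a ∈ (((pvRun E).1.setdefault a a).setdefault b b).keys := by
        rw [hc2keys]
        exact (PySem.Set.mem_add _ _ _).2 (.inl ((PySem.Set.mem_add _ _ _).2 (.inr rfl)))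
      have hmemb : b ∈ (((pvRun E).1.setdefault a a).setdefault b b).keys := by
        rw [hc2keys]
        exact (PySem.Set.mem_add _ _ _).2 (.inr rfl)
      have hrootkeys : ∀ x, pvRootD (pvRun E).1 x ∈ (pvRun E).1.keys
          ∨ pvRootD (pvRun E).1 x = x := by
        intro x
        by_cases hx : x ∈ (pvRun E).1.keys
        · left
          obtain ⟨p, hp, hpv⟩ := List.mem_map.1 (pvRootD_val _ hndk hx)
          rw [← hpv, ih1]
          exact ih2 p hp
        · right
          unfold pvRootD
          rw [PySem.Dict.getD_of_not_contains _ _ (Bool.eq_false_iff.2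
            (fun h => hx ((PySem.Dict.contains_iff_mem_keys _ _).1 h)))]
      have hkeysub : ∀ x ∈ (pvRun E).1.keys,
          x ∈ (((pvRun E).1.setdefault a a).setdefault b b).keys := by
        intro x hx
        rw [hc2keys]
        exact (PySem.Set.mem_add _ _ _).2 (.inl ((PySem.Set.mem_add _ _ _).2 (.inl hx)))
      have hmemra : pvRootD (pvRun E).1 a
          ∈ (((pvRun E).1.setdefault a a).setdefault b b).keys := by
        rcases hrootkeys a with h | h
        · exact hkeysub _ h
        · rw [h]
          exact hmema
      have hmemrb : pvRootD (pvRun E).1 b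
          ∈ (((pvRun E).1.setdefault a a).setdefault b b).keys := by
        rcases hrootkeys b with h | h
        · exact hkeysub _ h
        · rw [h]
          exact hmemb
      have hrootmem : ∀ x ∈ (((pvRun E).1.setdefault a a).setdefault b b).keys,
          pvRootD (pvRun E).1 x ∈ (((pvRun E).1.setdefault a a).setdefault b b).values := by
        intro x hx
        rw [← hroot2 x]
        exact pvRootD_val _ hndk2 hx
      by_cases hco : pvConn E a b
      · -- the edge closes within one component: no merge
        have hstep0 : pvStep (pvRun E).1 (a, b)
            = ((((pvRun E).1.setdefault a a).setdefault b b), false) := by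
          simp only [pvStep]
          rw [if_pos (hcond.2 hco)]
        have hstep : pvStepF (pvRun E) (a, b)
            = ((((pvRun E).1.setdefault a a).setdefault b b), (pvRun E).2) := by
          simp [pvStepF, hstep0]
        rw [hrun, hstep]
        dsimp only
        refine ⟨hkeys', hvals2', ?_, ?_, ?_, ?_⟩
        · intro x y
          rw [hroot2 x, hroot2 y, pvConn_append_pair_of_conn hco]
          exact ih3 x y
        · omega
        · simp only [List.length_append, List.length_singleton]
          omega
        · have hbad' : pvBad (E ++ [(a, b)]) := (pvBad_append_pair E a b).2 (.inr hco)
          simp only [List.length_append, List.length_singleton]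
          constructor
          · intro h
            omega
          · intro h
            exact absurd hbad' h
      · -- merge of two distinct components
        have hne : pvRootD (pvRun E).1 a ≠ pvRootD (pvRun E).1 b :=
          fun h => hco ((ih3 a b).1 h)
        have hstep0 : pvStep (pvRun E).1 (a, b)
            = (pvRelabel (((pvRun E).1.setdefault a a).setdefault b b)
                (pvRootD (pvRun E).1 b) (pvRootD (pvRun E).1 a), true) := by
          simp only [pvStep]
          rw [if_neg (fun h => hco (hcond.1 h))]
          rw [hrb, hra]
        have hstep : pvStepF (pvRun E) (a, b)
            = (pvRelabel (((pvRun E).1.setdefault a a).setdefault b b)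
                (pvRootD (pvRun E).1 b) (pvRootD (pvRun E).1 a), (pvRun E).2 + 1) := by
          simp [pvStepF, hstep0]
        rw [hrun, hstep]
        dsimp only
        have hravals := hrootmem a hmema
        have hrbvals := hrootmem b hmemb
        refine ⟨?_, ?_, ?_, ?_, ?_, ?_⟩
        · rw [pvRelabel_keys, hkeys']
        · intro p hp
          simp only [pvRelabel] at hp
          obtain ⟨q, hq, rfl⟩ := List.mem_map.1 hp
          by_cases h : q.2 = pvRootD (pvRun E).1 b
          · simp only [h, beq_self_eq_true, if_true]
            rw [← hkeys']
            exact hmemra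
          · simp only [beq_iff_eq, h, if_false]
            exact hvals2' q hq
        · intro x y
          rw [pvRootD_relabel _ _ _ x hmemrb, pvRootD_relabel _ _ _ y hmemrb,
            hroot2 x, hroot2 y, pvConn_append_pair]
          constructor
          · intro h
            by_cases hx : pvRootD (pvRun E).1 x = pvRootD (pvRun E).1 b
            · by_cases hy : pvRootD (pvRun E).1 y = pvRootD (pvRun E).1 b
              · exact .inl ((ih3 x y).1 (hx.trans hy.symm))
              · rw [if_pos hx, if_neg hy] at h
                exact .inr (.inr ⟨(ih3 x b).1 hx, (ih3 a y).1 h⟩)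
            · by_cases hy : pvRootD (pvRun E).1 y = pvRootD (pvRun E).1 b
              · rw [if_neg hx, if_pos hy] at h
                exact .inr (.inl ⟨(ih3 x a).1 h, (ih3 b y).1 hy.symm⟩)
              · rw [if_neg hx, if_neg hy] at h
                exact .inl ((ih3 x y).1 h)
          · rintro (h | ⟨h1, h2⟩ | ⟨h1, h2⟩)
            · rw [(ih3 x y).2 h]
            · rw [(ih3 x a).2 h1, ← (ih3 b y).2 h2, if_neg hne, if_pos rfl]
            · rw [(ih3 x b).2 h1, ← (ih3 a y).2 h2, if_pos rfl, if_neg hne]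
        · have hcoll : (PySem.Set.ofList (pvRelabel
              (((pvRun E).1.setdefault a a).setdefault b b)
              (pvRootD (pvRun E).1 b) (pvRootD (pvRun E).1 a)).values).length + 1
              = (PySem.Set.ofList
                  (((pvRun E).1.setdefault a a).setdefault b b).values).length := by
            rw [pvRelabel_values, pvOfList_length_eq_card, pvOfList_length_eq_card]
            exact pvCollapse_card _ _ _ hravals hrbvals hne
          omega
        · simp only [List.length_append, List.length_singleton]
          omega
        · have hbadiff := pvBad_append_pair E a b
          simp only [List.length_append, List.length_singleton]
          constructor
          · intro h
            have hm : (pvRun E).2 = E.length := by omega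
            intro hbad
            rcases hbadiff.1 hbad with h1 | h1
            · exact (ih6.1 hm) h1
            · exact hco h1
          · intro h
            have hnb : ¬ pvBad E := fun h1 => h (hbadiff.2 (.inl h1))
            have := ih6.2 hnb
            omega

theorem pvUF_run (E : List (String × String)) : ∀ c0,
    (pvUF E c0 = some (pvRunF E (c0, 0)).1 ∧ (pvRunF E (c0, 0)).2 = E.length) ∨
    (pvUF E c0 = none ∧ (pvRunF E (c0, 0)).2 < E.length) := by
  induction E with
  | nil =>
      intro c0
      left
      exact ⟨rfl, rfl⟩
  | cons e rest ih =>
      obtain ⟨a, b⟩ := e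
      intro c0
      by_cases hmerge : (c0.getD a a == (c0.setdefault a a).getD b b) = true
      · right
        have huf : pvUF ((a, b) :: rest) c0 = none := by
          simp only [pvUF]
          rw [if_pos hmerge]
        have hrf : pvRunF ((a, b) :: rest) (c0, 0)
            = pvRunF rest (((c0.setdefault a a).setdefault b b), 0) := by
          simp only [pvRunF, List.foldl_cons]
          congr 1
          simp only [pvStepF, pvStep]
          rw [if_pos hmerge]
          simp
        refine ⟨huf, ?_⟩
        rw [hrf]
        have := pvRunF_le rest ((c0.setdefault a a).setdefault b b)
        simp only [List.length_cons]
        omega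
      · have huf : pvUF ((a, b) :: rest) c0
            = pvUF rest (pvRelabel ((c0.setdefault a a).setdefault b b)
                ((c0.setdefault a a).getD b b) (c0.getD a a)) := by
          simp only [pvUF]
          rw [if_neg hmerge]
        have hrf : pvRunF ((a, b) :: rest) (c0, 0)
            = pvRunF rest (pvRelabel ((c0.setdefault a a).setdefault b b)
                ((c0.setdefault a a).getD b b) (c0.getD a a), 1) := by
          simp only [pvRunF, List.foldl_cons]
          congr 1
          simp only [pvStepF, pvStep]
          rw [if_neg hmerge]
          simp
        have hoff := pvRunF_offset rest (pvRelabel ((c0.setdefault a a).setdefault b b)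
            ((c0.setdefault a a).getD b b) (c0.getD a a)) 1
        rcases ih (pvRelabel ((c0.setdefault a a).setdefault b b)
            ((c0.setdefault a a).getD b b) (c0.getD a a)) with ⟨h1, h2⟩ | ⟨h1, h2⟩
        · left
          rw [huf, hrf, hoff]
          refine ⟨by rw [h1], ?_⟩
          simp only [List.length_cons]
          omega
        · right
          rw [huf, hrf, hoff]
          refine ⟨h1, ?_⟩
          simp only [List.length_cons]
          omega

theorem pvLen_eq_iff_subset {V N : List String} (hV : V.Nodup) (hN : N.Nodup)
    (hsub : ∀ x ∈ V, x ∈ N) : V.length = N.length ↔ ∀ x ∈ N, x ∈ V := by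
  constructor
  · intro hlen x hx
    have hperm := (List.subperm_of_subset hV hsub).perm_of_length_le (le_of_eq hlen.symm)
    exact hperm.symm.subset hx
  · intro h
    exact le_antisymm (List.subperm_of_subset hV hsub).length_le
      (List.subperm_of_subset hN h).length_le

theorem pvOfList_length_le_one_iff {l : List String} :
    (PySem.Set.ofList l).length ≤ 1 ↔ ∀ a ∈ l, ∀ b ∈ l, a = b := by
  constructor
  · intro h a ha b hb
    have ha' : a ∈ PySem.Set.ofList l := (PySem.Set.mem_ofList _ _).2 ha
    have hb' : b ∈ PySem.Set.ofList l := (PySem.Set.mem_ofList _ _).2 hb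
    match hs : PySem.Set.ofList l with
    | [] => rw [hs] at ha'; simp at ha'
    | [c] =>
        rw [hs] at ha' hb'
        simp only [List.mem_singleton] at ha' hb'
        rw [ha', hb']
    | c :: d :: t => rw [hs] at h; simp at h
  · intro h
    cases l with
    | nil => simp [PySem.Set.ofList]
    | cons c l =>
        rw [PySem.Set.ofList_cons]
        have hdisc : PySem.Set.discard (PySem.Set.ofList l) c = [] := by
          simp only [PySem.Set.discard, List.filter_eq_nil_iff]
          intro y hy
          have : y = c := h _ (List.mem_cons_of_mem _ ((PySem.Set.mem_ofList _ _).1 hy)) _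
            List.mem_cons_self
          simp [this]
        rw [hdisc]
        simp

-- all nodes connected ↔ the quick-find value set has at most one element
theorem pvClasses_le_one_iff (E : List (String × String)) :
    (PySem.Set.ofList (pvRun E).1.values).length ≤ 1 ↔ pvAllConn E := by
  obtain ⟨gi1, gi2, gi3, _, _, _⟩ := pvGI E
  have hndk : (pvRun E).1.keys.Nodup := gi1 ▸ nodup_pvNodes E
  rw [pvOfList_length_le_one_iff]
  constructor
  · intro hall x hx y hy
    have hx' : x ∈ (pvRun E).1.keys := gi1 ▸ hx
    have hy' : y ∈ (pvRun E).1.keys := gi1 ▸ hy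
    exact (gi3 x y).1 (hall _ (pvRootD_val _ hndk hx') _ (pvRootD_val _ hndk hy'))
  · intro hall v hv w hw
    obtain ⟨p, hp, hpv⟩ := List.mem_map.1 hv
    obtain ⟨q, hq, hqw⟩ := List.mem_map.1 hw
    obtain ⟨p1, p2⟩ := p
    obtain ⟨q1, q2⟩ := q
    dsimp only at hpv hqw
    subst hpv hqw
    have hp1 : p1 ∈ pvNodes E := gi1 ▸ List.mem_map.2 ⟨_, hp, rfl⟩
    have hq1 : q1 ∈ pvNodes E := gi1 ▸ List.mem_map.2 ⟨_, hq, rfl⟩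
    have hroot := (gi3 p1 q1).2 (hall _ hp1 _ hq1)
    unfold pvRootD at hroot
    rw [PySem.Dict.getD_of_mem_items _ hp hndk, PySem.Dict.getD_of_mem_items _ hq hndk]
      at hroot
    exact hroot

theorem pvB_iff (E : List (String × String)) :
    is_polytree_alt E = true ↔ (¬ pvBad E ∧ pvAllConn E) := by
  obtain ⟨_, _, _, _, _, gi6⟩ := pvGI E
  rcases pvUF_run E PySem.Dict.empty with ⟨h1, h2⟩ | ⟨h1, h2⟩
  · rw [show pvRunF E (PySem.Dict.empty, 0) = pvRun E from rfl] at h1 h2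
    have hnb : ¬ pvBad E := gi6.1 h2
    have halt : is_polytree_alt E
        = decide ((PySem.Set.ofList (pvRun E).1.values).length ≤ 1) := by
      unfold is_polytree_alt
      rw [h1]
    rw [halt]
    simp only [decide_eq_true_eq]
    rw [pvClasses_le_one_iff]
    exact ⟨fun h => ⟨hnb, h⟩, fun h => h.2⟩
  · rw [show pvRunF E (PySem.Dict.empty, 0) = pvRun E from rfl] at h2
    have hbad : pvBad E := by
      by_contra hnb
      have := gi6.2 hnb
      omega
    have halt : is_polytree_alt E = false := by
      unfold is_polytree_alt
      rw [h1]
    rw [halt]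
    simp only [Bool.false_eq_true, false_iff]
    rintro ⟨hnb, _⟩
    exact hnb hbad

-- ---------- BFS ----------

theorem pvBfsNbrs_spec (ns : List String) : ∀ (vis : PySem.Set String) (q : List String),
    (∀ x, x ∈ (pvBfsNbrs ns vis q).1 ↔ x ∈ vis ∨ x ∈ ns) ∧
    (vis.Nodup → (pvBfsNbrs ns vis q).1.Nodup) ∧
    (∀ x ∈ (pvBfsNbrs ns vis q).2, x ∈ q ∨ x ∈ ns) ∧
    (∀ x ∈ q, x ∈ (pvBfsNbrs ns vis q).2) ∧
    (pvBfsNbrs ns vis q).1.length + q.length = vis.length + (pvBfsNbrs ns vis q).2.length ∧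
    ((∀ x ∈ q, x ∈ vis) → ∀ x ∈ (pvBfsNbrs ns vis q).2, x ∈ (pvBfsNbrs ns vis q).1) ∧
    (∀ x ∈ (pvBfsNbrs ns vis q).1, x ∈ vis ∨ x ∈ (pvBfsNbrs ns vis q).2) := by
  induction ns with
  | nil =>
      intro vis q
      refine ⟨by simp [pvBfsNbrs], fun h => by simpa [pvBfsNbrs] using h, ?_, ?_, ?_, ?_, ?_⟩
      · intro x hx; exact .inl (by simpa [pvBfsNbrs] using hx)
      · intro x hx; simpa [pvBfsNbrs] using hx
      · simp [pvBfsNbrs]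
      · intro hq x hx; exact hq x (by simpa [pvBfsNbrs] using hx)
      · intro x hx; exact .inl (by simpa [pvBfsNbrs] using hx)
  | cons nb rest ih =>
      intro vis q
      by_cases hv : nb ∈ vis
      · have hstep : pvBfsNbrs (nb :: rest) vis q = pvBfsNbrs rest vis q := by
          simp [pvBfsNbrs, hv]
        rw [hstep]
        obtain ⟨h1, h2, h3, h4, h5, h6, h7⟩ := ih vis q
        refine ⟨?_, h2, ?_, h4, h5, h6, h7⟩
        · intro x
          rw [h1]
          constructor
          · rintro (h | h)
            · exact .inl h
            · exact .inr (List.mem_cons_of_mem _ h)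
          · rintro (h | h)
            · exact .inl h
            · rcases List.mem_cons.1 h with rfl | h
              · exact .inl hv
              · exact .inr h
        · intro x hx
          rcases h3 x hx with h | h
          · exact .inl h
          · exact .inr (List.mem_cons_of_mem _ h)
      · have hstep : pvBfsNbrs (nb :: rest) vis q
            = pvBfsNbrs rest (PySem.Set.add vis nb) (q ++ [nb]) := by
          simp [pvBfsNbrs, hv]
        rw [hstep]
        obtain ⟨h1, h2, h3, h4, h5, h6, h7⟩ := ih (PySem.Set.add vis nb) (q ++ [nb])
        have hadd : PySem.Set.add vis nb = vis ++ [nb] := PySem.Set.add_of_not_mem hv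
        refine ⟨?_, ?_, ?_, ?_, ?_, ?_, ?_⟩
        · intro x
          rw [h1, hadd]
          simp only [List.mem_append, List.mem_cons]
          tauto
        · intro hnd
          exact h2 (PySem.Set.nodup_add vis nb hnd)
        · intro x hx
          rcases h3 x hx with h | h
          · rcases List.mem_append.1 h with h' | h'
            · exact .inl h'
            · have : x = nb := by simpa using h'
              exact .inr (this ▸ List.mem_cons_self)
          · exact .inr (List.mem_cons_of_mem _ h)
        · intro x hx
          exact h4 x (List.mem_append.2 (.inl hx))
        · rw [hadd] at h5 ⊢
          simp only [List.length_append, List.length_singleton] at h5 ⊢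
          omega
        · intro hq
          apply h6
          intro x hx
          rw [hadd]
          rcases List.mem_append.1 hx with h' | h'
          · exact List.mem_append.2 (.inl (hq x h'))
          · exact List.mem_append.2 (.inr h')
        · intro x hx
          rcases h7 x hx with h | h
          · rw [hadd] at h
            rcases List.mem_append.1 h with h' | h'
            · exact .inl h'
            · exact .inr (h4 x (List.mem_append.2 (.inr h')))
          · exact .inr h

theorem pvBfs_main {E : List (String × String)} {g : PySem.Dict String (List String)}
    (hg : ∀ x nb, nb ∈ g.getD x [] ↔ pvAdj E x nb) (start : String) :
    ∀ fuel (q vis : List String),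
      vis.Nodup → (∀ x ∈ q, x ∈ vis) → (∀ x ∈ vis, x ∈ start :: pvNodes E) →
      (∀ x ∈ vis, pvConn E start x) →
      (∀ x ∈ vis, x ∈ q ∨ ∀ nb, pvAdj E x nb → nb ∈ vis) →
      ((pvNodes E).length + 1 - vis.length) + q.length ≤ fuel →
      (pvBfs g fuel q vis).Nodup ∧
      (∀ x ∈ vis, x ∈ pvBfs g fuel q vis) ∧
      (∀ x ∈ pvBfs g fuel q vis, x ∈ start :: pvNodes E) ∧
      (∀ x ∈ pvBfs g fuel q vis, pvConn E start x) ∧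
      (∀ x ∈ pvBfs g fuel q vis, ∀ nb, pvAdj E x nb → nb ∈ pvBfs g fuel q vis) := by
  intro fuel
  induction fuel with
  | zero =>
      intro q vis hnd hq hsubN hconn hinv hfuel
      have hq0 : q = [] := by
        cases q with
        | nil => rfl
        | cons a q => simp at hfuel
      subst hq0
      have hbfs : pvBfs g 0 [] vis = vis := by simp [pvBfs]
      rw [hbfs]
      refine ⟨hnd, fun x hx => hx, hsubN, hconn, ?_⟩
      intro x hx nb hadj
      rcases hinv x hx with h | h
      · simp at h
      · exact h nb hadj
  | succ fuel ih =>
      intro q vis hnd hq hsubN hconn hinv hfuel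
      cases q with
      | nil =>
          have hbfs : pvBfs g (fuel + 1) [] vis = vis := by simp [pvBfs]
          rw [hbfs]
          refine ⟨hnd, fun x hx => hx, hsubN, hconn, ?_⟩
          intro x hx nb hadj
          rcases hinv x hx with h | h
          · simp at h
          · exact h nb hadj
      | cons node rest =>
          obtain ⟨h1, h2, h3, h4, h5, h6, h7⟩ := pvBfsNbrs_spec (g.getD node []) vis rest
          have hbfs : pvBfs g (fuel + 1) (node :: rest) vis
              = pvBfs g fuel (pvBfsNbrs (g.getD node []) vis rest).2
                  (pvBfsNbrs (g.getD node []) vis rest).1 := by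
            simp [pvBfs]
          have hrest : ∀ x ∈ rest, x ∈ vis := fun x hx => hq x (List.mem_cons_of_mem _ hx)
          have hnodevis : node ∈ vis := hq node List.mem_cons_self
          have hmono : ∀ x ∈ vis, x ∈ (pvBfsNbrs (g.getD node []) vis rest).1 :=
            fun x hx => (h1 x).2 (.inl hx)
          have hsubN' : ∀ x ∈ (pvBfsNbrs (g.getD node []) vis rest).1, x ∈ start :: pvNodes E := by
            intro x hx
            rcases (h1 x).1 hx with h | h
            · exact hsubN x h
            · have hadj : pvAdj E node x := (hg node x).1 h
              refine List.mem_cons_of_mem _ ?_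
              rcases hadj with h' | h'
              · exact mem_pvNodes.2 ⟨_, h', .inr rfl⟩
              · exact mem_pvNodes.2 ⟨_, h', .inl rfl⟩
          have hconn' : ∀ x ∈ (pvBfsNbrs (g.getD node []) vis rest).1, pvConn E start x := by
            intro x hx
            rcases (h1 x).1 hx with h | h
            · exact hconn x h
            · exact (hconn node hnodevis).tail ((hg node x).1 h)
          have hlen1 : vis.length ≤ (pvNodes E).length + 1 :=
            le_trans (List.subperm_of_subset hnd (fun x hx => hsubN x hx)).length_le
              (by simp)
          have hnd' : (pvBfsNbrs (g.getD node []) vis rest).1.Nodup := h2 hnd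
          have hlen2 : (pvBfsNbrs (g.getD node []) vis rest).1.length ≤ (pvNodes E).length + 1 :=
            le_trans (List.subperm_of_subset hnd' (fun x hx => hsubN' x hx)).length_le
              (by simp)
          have hres := ih (pvBfsNbrs (g.getD node []) vis rest).2
            (pvBfsNbrs (g.getD node []) vis rest).1
            hnd'
            (h6 hrest)
            hsubN'
            hconn'
            (by
              intro x hx
              rcases h7 x hx with h | h
              · rcases hinv x h with h' | h'
                · rcases List.mem_cons.1 h' with rfl | h'
                  · right
                    intro nb hadj
                    exact (h1 nb).2 (.inr ((hg x nb).2 hadj))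
                  · exact .inl (h4 x h')
                · right
                  intro nb hadj
                  exact hmono _ (h' nb hadj)
              · exact .inl h)
            (by
              simp only [List.length_cons] at hfuel
              omega)
          rw [hbfs]
          exact ⟨hres.1, fun x hx => hres.2.1 x (hmono x hx), hres.2.2.1, hres.2.2.2.1,
            hres.2.2.2.2⟩

theorem pvConn_closed {E : List (String × String)} {V : List String} {start y : String}
    (hstart : start ∈ V) (hclosed : ∀ x ∈ V, ∀ nb, pvAdj E x nb → nb ∈ V)
    (h : pvConn E start y) : y ∈ V := by
  induction h with
  | refl => exact hstart
  | tail _ hadj ih => exact hclosed _ ih _ hadj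

theorem pvNodes_nil_iff (E : List (String × String)) : pvNodes E = [] ↔ E = [] := by
  constructor
  · intro h
    cases E with
    | nil => rfl
    | cons e E' =>
        exfalso
        have : e.1 ∈ pvNodes (e :: E') := mem_pvNodes.2 ⟨e, List.mem_cons_self, .inl rfl⟩
        rw [h] at this
        simp at this
  · rintro rfl
    rfl

theorem pvA_iff (E : List (String × String)) :
    is_polytree E = true ↔ (¬ pvBad E ∧ pvAllConn E) := by
  obtain ⟨gi1, gi2, gi3, gi4, gi5, gi6⟩ := pvGI E
  have hndk : (pvRun E).1.keys.Nodup := gi1 ▸ nodup_pvNodes E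
  have hnodesUG : (pvBuildUG E).1 = pvNodes E := by rw [pvBuildUG_eq]
  have hIP : is_polytree E = (if pvHasCycles E then false else
      match (pvBuildUG E).1 with
      | [] => true
      | start :: _ =>
          ((PySem.List.len (pvBfs (pvBuildUG E).2 ((pvBuildUG E).1.length + 1) [start]
              (PySem.Set.add PySem.Set.empty start)) == PySem.List.len (pvBuildUG E).1) &&
           (PySem.List.len E == PySem.List.len (pvBuildUG E).1 - 1))) := rfl
  by_cases hcy : pvHasCycles E = true
  · -- A found a directed cycle: both sides are false
    rw [hIP, if_pos hcy]
    simp only [Bool.false_eq_true, false_iff]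
    rintro ⟨hnb, _⟩
    exact hnb (pvCycle_bad (pvHasCycles_sound hcy))
  · rw [hIP, if_neg hcy]
    cases hN : (pvBuildUG E).1 with
    | nil =>
        have hE : E = [] := (pvNodes_nil_iff E).1 (hnodesUG ▸ hN)
        subst hE
        simp only [true_iff]
        refine ⟨pvBad_nil, ?_⟩
        intro x hx
        simp [pvNodes] at hx
    | cons start rest =>
        have hNnodes : pvNodes E = start :: rest := hnodesUG ▸ hN
        dsimp only
        rw [show (PySem.Set.add PySem.Set.empty start) = [start] from rfl, ← hNnodes]
        have hstartN : start ∈ pvNodes E := by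
          rw [hNnodes]
          exact List.mem_cons_self
        have hg : ∀ x nb, nb ∈ (pvBuildUG E).2.getD x [] ↔ pvAdj E x nb :=
          fun x nb => mem_ugraph
        obtain ⟨b1, b2, b3, b4, b5⟩ := pvBfs_main hg start ((pvNodes E).length + 1)
          [start] [start]
          (by simp)
          (by simp)
          (by
            intro x hx
            simp only [List.mem_singleton] at hx
            subst hx
            exact List.mem_cons_self)
          (by
            intro x hx
            simp only [List.mem_singleton] at hx
            subst hx
            exact .refl)
          (by
            intro x hx
            exact .inl hx)
          (by simp)
        have hVN : ∀ x ∈ pvBfs (pvBuildUG E).2 ((pvNodes E).length + 1) [start] [start],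
            x ∈ pvNodes E := by
          intro x hx
          rcases List.mem_cons.1 (b3 x hx) with rfl | h
          · exact hstartN
          · exact h
        have hstartV : start ∈ pvBfs (pvBuildUG E).2 ((pvNodes E).length + 1)
            [start] [start] := b2 start List.mem_cons_self
        have hlen_iff := pvLen_eq_iff_subset b1 (nodup_pvNodes E) hVN
        have hvalpos : 1 ≤ (PySem.Set.ofList (pvRun E).1.values).length := by
          have hmem : pvRootD (pvRun E).1 start ∈ (pvRun E).1.values :=
            pvRootD_val _ hndk (gi1 ▸ hstartN)
          have : pvRootD (pvRun E).1 start ∈ PySem.Set.ofList (pvRun E).1.values :=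
            (PySem.Set.mem_ofList _ _).2 hmem
          exact List.length_pos_of_mem this
        have hNpos : 1 ≤ (pvNodes E).length := by
          rw [hNnodes]
          simp
        simp only [Bool.and_eq_true, beq_iff_eq, PySem.List.len_eq]
        constructor
        · rintro ⟨hlen, hcount⟩
          have hlenN : (pvBfs (pvBuildUG E).2 ((pvNodes E).length + 1)
              [start] [start]).length = (pvNodes E).length := by
            exact_mod_cast hlen
          have hEcount : E.length + 1 = (pvNodes E).length := by omega
          have hNV := hlen_iff.1 hlenN
          have hallconn : pvAllConn E := by
            intro x hx y hy
            exact (pvConn_symm (b4 x (hNV x hx))).trans (b4 y (hNV y hy))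
          refine ⟨?_, hallconn⟩
          have hcls : (PySem.Set.ofList (pvRun E).1.values).length ≤ 1 :=
            (pvClasses_le_one_iff E).2 hallconn
          have hm : (pvRun E).2 = E.length := by omega
          exact gi6.1 hm
        · rintro ⟨hnb, hallconn⟩
          have hNV : ∀ x ∈ pvNodes E, x ∈ pvBfs (pvBuildUG E).2
              ((pvNodes E).length + 1) [start] [start] := by
            intro x hx
            exact pvConn_closed hstartV b5 (hallconn start hstartN x hx)
          have hlenN := hlen_iff.2 hNV
          have hcls : (PySem.Set.ofList (pvRun E).1.values).length ≤ 1 :=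
            (pvClasses_le_one_iff E).2 hallconn
          have hm := gi6.2 hnb
          have hEcount : E.length + 1 = (pvNodes E).length := by omega
          constructor
          · exact_mod_cast hlenN
          · omega

-- ===== VERDICT (by name: the statement is the Claim_ definition above) =====
theorem is_polytree_spec : Claim_equal_is_polytree := by
  intro E _
  unfold Spec_is_polytree
  have hAB : is_polytree E = true ↔ is_polytree_alt E = true :=
    (pvA_iff E).trans (pvB_iff E).symm
  cases hA' : is_polytree E
  · cases hB' : is_polytree_alt E
    · rfl
    · rw [hA', hB'] at hAB
      exact absurd (hAB.2 rfl) (by simp)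
  · cases hB' : is_polytree_alt E
    · rw [hA', hB'] at hAB
      exact absurd (hAB.1 rfl) (by simp)
    · rfl
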